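-- pv_equiv track=rewrite | github.com/ClayRitterson/Custom-Cipher | CustomCipher2.py | encryptSpaces
-- ===== SOURCE A (Python) =====
-- def encryptSpaces(spacesAt):
--     if len(spacesAt) == 0:
--         return 'ZZZ'
--     crpytSpaces = ''
--     newSpaces = ''
--     for i in range(len(spacesAt)):
--         spaceVal = spacesAt[i]
--         spacer = (spaceVal // 26)
--         spaceMod = spaceVal % 26
--         spacerLetter = alph[spacer]
--         spaceModLetter = alph[spaceMod]
--         crpytSpaces += spacerLetter
--         crpytSpaces += spaceModLetter
--     for i in range(len(crpytSpaces)):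
--         newSpaces += crpytSpaces[len(crpytSpaces)-(i + 1)]
--     cryptSpacer = (len(spacesAt) // 26)
--     cryptMod = (len(spacesAt) % 26 )
--     cryptSpacerLetter = alph[cryptSpacer]
--     cryptModSpacer = alph[cryptMod]
--     newSpaces += cryptModSpacer
--     newSpaces += cryptSpacerLetter
--     return newSpaces
--
-- alph = ['A','B','C','D','E','F','G','H','I','J','K','L','M','N','O','P','Q','R','S','T','U','V','W','X','Y','Z']
-- ===== SOURCE B (Python) =====
-- alph = ['A','B','C','D','E','F','G','H','I','J','K','L','M','N','O','P','Q','R','S','T','U','V','W','X','Y','Z']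
--
--
-- def encryptSpaces(spacesAt):
--     # Single pass over reversed(spacesAt) emits the already-reversed letter
--     # stream directly; no forward string, no char-by-char reversal loop.
--     if not spacesAt:
--         return 'ZZZ'
--     out = []
--     for v in reversed(spacesAt):
--         out.append(alph[v % 26])
--         out.append(alph[v // 26])
--     n = len(spacesAt)
--     out.append(alph[n % 26])
--     out.append(alph[n // 26])
--     return ''.join(out)
-- ===== Notes on version B (the rewrite author's own statement) =====
-- stated objective: simpler
-- what changed: B drops A's forward intermediate string and its char-by-char reversal loop: a single pass over reversed(spacesAt) appends alph[v % 26] then alph[v // 26] directly into a list, emitting the already-reversed letter stream, then appends the length suffix and joins once.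
import Mathlib
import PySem

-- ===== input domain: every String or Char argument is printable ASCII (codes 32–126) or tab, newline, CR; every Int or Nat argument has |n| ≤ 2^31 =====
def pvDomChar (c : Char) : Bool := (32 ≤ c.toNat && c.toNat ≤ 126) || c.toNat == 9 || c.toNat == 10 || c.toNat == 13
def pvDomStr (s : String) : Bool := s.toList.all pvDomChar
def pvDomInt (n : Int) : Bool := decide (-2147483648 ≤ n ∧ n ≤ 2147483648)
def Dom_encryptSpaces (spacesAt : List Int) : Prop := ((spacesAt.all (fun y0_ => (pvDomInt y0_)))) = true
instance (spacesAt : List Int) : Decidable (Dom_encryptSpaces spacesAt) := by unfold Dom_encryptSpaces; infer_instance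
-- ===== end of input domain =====

-- B emits the already-reversed letter stream in one pass over the reversed input,
-- dropping A's forward string and its char-by-char reversal loop (objective: simpler).

-- ===== PORT A =====
def alphL : List Char :=
  ['A','B','C','D','E','F','G','H','I','J','K','L','M',
   'N','O','P','Q','R','S','T','U','V','W','X','Y','Z']

-- one iteration of A's first loop: spacer/mod letters appended in that order
-- (Option = IndexError from alph[spacer] / alph[spaceMod], excluded by Pre_)
def encAStep (acc : List Char) (v : Int) : Option (List Char) := do
  let spacerLetter ← PySem.List.pyGet? alphL (PySem.Int.floordiv v 26)
  let spaceModLetter ← PySem.List.pyGet? alphL (PySem.Int.mod v 26)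
  pure (acc ++ [spacerLetter, spaceModLetter])

def encryptSpaces (spacesAt : List Int) : String :=
  if spacesAt.length = 0 then "ZZZ"
  else
    match spacesAt.foldlM encAStep [] with
    | none => ""   -- IndexError in the first loop; outside Pre_
    | some crpytSpaces =>
      -- second loop: newSpaces += crpytSpaces[len-(i+1)]; index is a Nat always in range
      let newSpaces :=
        (List.range crpytSpaces.length).foldl
          (fun acc i => acc ++ [crpytSpaces.getD (crpytSpaces.length - (i + 1)) 'A']) []
      match PySem.List.pyGet? alphL (PySem.Int.floordiv (spacesAt.length : Int) 26),
            PySem.List.pyGet? alphL (PySem.Int.mod (spacesAt.length : Int) 26) with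
      | some cryptSpacerLetter, some cryptModSpacer =>
          String.ofList (newSpaces ++ [cryptModSpacer, cryptSpacerLetter])
      | _, _ => ""   -- IndexError on the length letters; outside Pre_

-- ===== PORT B =====
def alphB : List Char :=
  ['A','B','C','D','E','F','G','H','I','J','K','L','M',
   'N','O','P','Q','R','S','T','U','V','W','X','Y','Z']

-- one iteration of B's loop: mod letter then spacer letter, straight into out
def encBStep (acc : List Char) (v : Int) : Option (List Char) := do
  let modLetter ← PySem.List.pyGet? alphB (PySem.Int.mod v 26)
  let spacerLetter ← PySem.List.pyGet? alphB (PySem.Int.floordiv v 26)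
  pure (acc ++ [modLetter, spacerLetter])

def encryptSpaces_alt (spacesAt : List Int) : String :=
  if spacesAt = [] then "ZZZ"
  else
    -- Option = IndexError from an alph lookup; those inputs are outside Pre_
    ((spacesAt.reverse.foldlM encBStep []).bind fun out =>
      (PySem.List.pyGet? alphB (PySem.Int.mod (spacesAt.length : Int) 26)).bind fun modLetter =>
        (PySem.List.pyGet? alphB (PySem.Int.floordiv (spacesAt.length : Int) 26)).map fun spacerLetter =>
          String.ofList (out ++ [modLetter, spacerLetter])).getD ""

-- ===== PRECONDITION & SPEC =====
-- Pre_ excludes exactly the inputs on which A raises IndexError: a value v with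
-- v // 26 outside -26..25 (i.e. v ∉ [-676, 675]), or a list so long that
-- len(spacesAt) // 26 ≥ 26 (i.e. more than 675 entries).
def Pre_encryptSpaces (spacesAt : List Int) : Prop :=
  spacesAt.length ≤ 675 ∧ ∀ v ∈ spacesAt, -676 ≤ v ∧ v ≤ 675
instance (spacesAt : List Int) : Decidable (Pre_encryptSpaces spacesAt) := by
  unfold Pre_encryptSpaces; infer_instance

def pvWitness_encryptSpaces : List Int := [0, 30, -5, 675, -676]

def Spec_encryptSpaces (spacesAt : List Int) (out : String) : Prop := out = encryptSpaces_alt spacesAt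
instance (spacesAt : List Int) (out : String) : Decidable (Spec_encryptSpaces spacesAt out) := by unfold Spec_encryptSpaces; infer_instance

-- ===== CLAIM (what is proved, stated in full; the proofs are below) =====
def Claim_equal_encryptSpaces : Prop := ∀ (spacesAt : List Int), Dom_encryptSpaces spacesAt → Pre_encryptSpaces spacesAt → Spec_encryptSpaces spacesAt (encryptSpaces spacesAt)

-- ===== LEMMAS AND PROOFS =====

lemma alphB_eq_alphL : alphB = alphL := rfl

-- total letter lookup used only in the proofs
def letter (i : Int) : Char := (PySem.List.pyGet? alphL i).getD 'A'

lemma pyGet_alph_some (i : Int) (h1 : -26 ≤ i) (h2 : i < 26) :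
    PySem.List.pyGet? alphL i = some (letter i) := by
  have hlen : alphL.length = 26 := by decide
  have hr : PySem.Raise.InRange alphL.length i := by
    simp [PySem.Raise.InRange, hlen]; omega
  cases hg : PySem.List.pyGet? alphL i with
  | none => exact ((PySem.List.pyGet?_eq_none_iff _ _).mp hg hr).elim
  | some c => simp [letter, hg]

def enc2 (v : Int) : List Char :=
  [letter (PySem.Int.floordiv v 26), letter (PySem.Int.mod v 26)]

lemma bounds_fd {v : Int} (h1 : -676 ≤ v) (h2 : v ≤ 675) :
    -26 ≤ PySem.Int.floordiv v 26 ∧ PySem.Int.floordiv v 26 < 26 := by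
  constructor
  · exact (PySem.Int.le_floordiv_iff_mul_le (by omega)).mpr (by omega)
  · exact (PySem.Int.floordiv_lt_iff_lt_mul (by omega)).mpr (by omega)

lemma bounds_md (v : Int) :
    -26 ≤ PySem.Int.mod v 26 ∧ PySem.Int.mod v 26 < 26 := by
  have h1 := PySem.Int.mod_nonneg v (b := 26) (by omega)
  have h2 := PySem.Int.mod_lt v (b := 26) (by omega)
  omega

lemma loopA (l : List Int) (h : ∀ v ∈ l, -676 ≤ v ∧ v ≤ 675) :
    ∀ acc, l.foldlM encAStep acc = some (acc ++ l.flatMap enc2) := by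
  induction l with
  | nil => intro acc; simp [List.foldlM]
  | cons x xs ih =>
    intro acc
    obtain ⟨hx1, hx2⟩ := h x (by simp)
    have hfd := bounds_fd hx1 hx2
    have hmd := bounds_md x
    simp only [List.foldlM_cons, encAStep,
      pyGet_alph_some _ hfd.1 hfd.2, pyGet_alph_some _ hmd.1 hmd.2,
      Option.bind_eq_bind, Option.bind_some, Option.pure_def]
    rw [ih (fun v hv => h v (by simp [hv]))]
    simp [enc2]

def enc2r (v : Int) : List Char :=
  [letter (PySem.Int.mod v 26), letter (PySem.Int.floordiv v 26)]

lemma loopB (l : List Int) (h : ∀ v ∈ l, -676 ≤ v ∧ v ≤ 675) :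
    ∀ acc, l.foldlM encBStep acc = some (acc ++ l.flatMap enc2r) := by
  induction l with
  | nil => intro acc; simp [List.foldlM]
  | cons x xs ih =>
    intro acc
    obtain ⟨hx1, hx2⟩ := h x (by simp)
    have hfd := bounds_fd hx1 hx2
    have hmd := bounds_md x
    simp only [List.foldlM_cons, encBStep, alphB_eq_alphL,
      pyGet_alph_some _ hfd.1 hfd.2, pyGet_alph_some _ hmd.1 hmd.2,
      Option.bind_eq_bind, Option.bind_some, Option.pure_def]
    rw [ih (fun v hv => h v (by simp [hv]))]
    simp [enc2r]

-- A's second loop is the reversal of the string it walks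
lemma revLoop (c : List Char) :
    (List.range c.length).foldl
      (fun acc i => acc ++ [c.getD (c.length - (i + 1)) 'A']) [] = c.reverse := by
  rw [PySem.List.foldl_append_singleton_eq_map]
  apply List.ext_getElem
  · simp
  · intro i h1 h2
    simp only [List.nil_append, List.getElem_map, List.getElem_range, List.getElem_reverse]
    simp only [List.nil_append, List.length_map, List.length_range] at h1
    rw [List.getD_eq_getElem c 'A' (by omega)]
    congr 1
    omega

-- the reversed pairwise stream: reverse ∘ flatMap enc2 = flatMap enc2r ∘ reverse
lemma rev_flat (l : List Int) :
    (l.flatMap enc2).reverse = l.reverse.flatMap enc2r := by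
  induction l with
  | nil => simp
  | cons x xs ih => simp [ih, enc2, enc2r]

-- ===== VERDICT (by name: the statement is the Claim_ definition above) =====
theorem encryptSpaces_spec : Claim_equal_encryptSpaces := by
  intro spacesAt _ hPre
  obtain ⟨hlen, hvals⟩ := hPre
  unfold Spec_encryptSpaces encryptSpaces encryptSpaces_alt
  by_cases hnil : spacesAt = []
  · simp [hnil]
  · have hlen0 : spacesAt.length ≠ 0 := by simpa [List.length_eq_zero_iff] using hnil
    rw [if_neg hlen0, if_neg hnil]
    rw [loopA spacesAt hvals [], loopB spacesAt.reverse (fun v hv => hvals v (by simpa using hv)) []]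
    have hn1 : -26 ≤ PySem.Int.floordiv (spacesAt.length : Int) 26 ∧
        PySem.Int.floordiv (spacesAt.length : Int) 26 < 26 :=
      bounds_fd (by omega) (by exact_mod_cast hlen)
    have hn2 := bounds_md (spacesAt.length : Int)
    simp only [alphB_eq_alphL]
    rw [pyGet_alph_some _ hn1.1 hn1.2, pyGet_alph_some _ hn2.1 hn2.2]
    simp only [List.nil_append]
    rw [revLoop, rev_flat]
    simp
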